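-- pv_equiv track=rewrite | github.com/pranavsv16/Market-Segmentation-Using-Attributed-Graph-Community-Detection | sac1.py | rebaseClusters
-- ===== SOURCE A (Python) =====
-- def rebaseClusters(list):
--
--     newMapping = {}
--     # new community list
--     newCommunityList = []
--     count = 0
--
--     mappedClusters = {}
--     for i in range(len(list)):
--         vertex = list[i]
--         if vertex in newMapping:
--             newCommunityList.append(newMapping[vertex])
--             mappedClusters[newMapping[vertex]].append(i)
--         else:
--             newMapping[vertex] = count
--             newCommunityList.append(count)
--             mappedClusters[count] = [i]
--             count+=1
--     return newCommunityList, mappedClusters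
-- ===== SOURCE B (Python) =====
-- def rebaseClusters(list):
--     # Pass 1: relabel each distinct value with the next consecutive id.
--     newMapping = {}
--     newCommunityList = []
--     for vertex in list:
--         if vertex not in newMapping:
--             newMapping[vertex] = len(newMapping)
--         newCommunityList.append(newMapping[vertex])
--     # Pass 2: group positions by their new label.
--     mappedClusters = {}
--     for i, label in enumerate(newCommunityList):
--         mappedClusters[label] = mappedClusters.get(label, []) + [i]
--     return newCommunityList, mappedClusters
-- ===== Notes on version B (the rewrite author's own statement) =====
-- stated objective: simpler
-- what changed: A's single fused loop that maintains the mapping, the relabelled list and the groups dict all at once is split into two plain passes: one building the consecutive relabelling (the counter is just len(newMapping)), and a second over enumerate(newCommunityList) grouping positions by label.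
import Mathlib
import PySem

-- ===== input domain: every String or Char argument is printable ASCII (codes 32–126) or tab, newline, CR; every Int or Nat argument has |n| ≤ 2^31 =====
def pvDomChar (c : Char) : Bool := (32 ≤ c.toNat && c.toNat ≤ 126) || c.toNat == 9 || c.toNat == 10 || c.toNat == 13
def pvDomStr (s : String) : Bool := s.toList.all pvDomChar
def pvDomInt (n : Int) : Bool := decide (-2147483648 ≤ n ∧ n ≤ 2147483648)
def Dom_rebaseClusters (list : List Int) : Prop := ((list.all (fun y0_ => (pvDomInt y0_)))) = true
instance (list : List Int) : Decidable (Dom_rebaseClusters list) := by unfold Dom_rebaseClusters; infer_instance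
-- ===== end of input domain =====

-- B splits A's fused loop into two plain passes (relabel, then group by label); same O(n) cost, simpler decomposition.


-- ===== PORT A =====
-- One fused loop over range(len(list)): state = (newMapping, newCommunityList, count, mappedClusters).
-- 'mappedClusters[lbl].append(i)' is ported as Dict.modify lbl [] (· ++ [i]) (the key is always present there).
def rebaseClusters (list : List Int) : List Int × (List (Int × List Int)) :=
  let st := (PySem.List.pyRange 0 list.length 1).foldl
    (fun (st : PySem.Dict Int Int × List Int × Int × PySem.Dict Int (List Int)) i =>
      let vertex := PySem.List.pyGetD list i 0
      if st.1.contains vertex then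
        let lbl := st.1.getD vertex 0
        (st.1, st.2.1 ++ [lbl], st.2.2.1, st.2.2.2.modify lbl [] (· ++ [i]))
      else
        (st.1.insert vertex st.2.2.1, st.2.1 ++ [st.2.2.1], st.2.2.1 + 1,
          st.2.2.2.insert st.2.2.1 [i]))
    (PySem.Dict.empty, [], 0, PySem.Dict.empty)
  (st.2.1, st.2.2.2.items)

-- ===== PORT B =====
-- Pass 1: consecutive relabelling (counter = len(newMapping)).
def rebaseAltPass1 (list : List Int) : PySem.Dict Int Int × List Int :=
  list.foldl
    (fun (st : PySem.Dict Int Int × List Int) vertex =>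
      let nm := if st.1.contains vertex then st.1 else st.1.insert vertex (st.1.size : Int)
      (nm, st.2 ++ [nm.getD vertex 0]))
    (PySem.Dict.empty, [])

-- Pass 2: group positions by label over enumerate(newCommunityList).
def rebaseAltPass2 (ncl : List Int) : PySem.Dict Int (List Int) :=
  (PySem.List.enumerate ncl 0).foldl
    (fun (d : PySem.Dict Int (List Int)) p => d.insert p.2 (d.getD p.2 [] ++ [p.1]))
    PySem.Dict.empty

def rebaseClusters_alt (list : List Int) : List Int × (List (Int × List Int)) :=
  let ncl := (rebaseAltPass1 list).2
  (ncl, (rebaseAltPass2 ncl).items)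

-- ===== PRECONDITION & SPEC =====
def Spec_rebaseClusters (list : List Int) (out : List Int × (List (Int × List Int))) : Prop := out = rebaseClusters_alt list
instance (list : List Int) (out : List Int × (List (Int × List Int))) : Decidable (Spec_rebaseClusters list out) := by unfold Spec_rebaseClusters; infer_instance

-- ===== CLAIM (what is proved, stated in full; the proofs are below) =====
def Claim_equal_rebaseClusters : Prop := ∀ (list : List Int), Dom_rebaseClusters list → Spec_rebaseClusters list (rebaseClusters list)

-- ===== LEMMAS AND PROOFS =====

-- A's fused step, over (index, vertex) pairs.
def stepA (st : PySem.Dict Int Int × List Int × Int × PySem.Dict Int (List Int))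
    (p : Int × Int) : PySem.Dict Int Int × List Int × Int × PySem.Dict Int (List Int) :=
  if st.1.contains p.2 then
    (st.1, st.2.1 ++ [st.1.getD p.2 0], st.2.2.1, st.2.2.2.modify (st.1.getD p.2 0) [] (· ++ [p.1]))
  else
    (st.1.insert p.2 st.2.2.1, st.2.1 ++ [st.2.2.1], st.2.2.1 + 1, st.2.2.2.insert st.2.2.1 [p.1])

-- A's fold over range(len(list)) with list[i] is the same fold over enumerate(list).
theorem rebaseClusters_eq_enum (list : List Int) :
    rebaseClusters list =
      (let st := (PySem.List.enumerate list 0).foldl stepA (PySem.Dict.empty, [], 0, PySem.Dict.empty)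
       (st.2.1, st.2.2.2.items)) := by
  unfold rebaseClusters
  rw [PySem.List.enumerate_eq_map_pyRange (d := 0), List.foldl_map]
  rfl

-- The invariant carried through A's fold, phrased against B's two passes.
theorem invariant (xs : List Int) :
    (PySem.List.enumerate xs 0).foldl stepA (PySem.Dict.empty, [], 0, PySem.Dict.empty)
      = ((rebaseAltPass1 xs).1, (rebaseAltPass1 xs).2,
         ((rebaseAltPass1 xs).1.size : Int), rebaseAltPass2 (rebaseAltPass1 xs).2)
    ∧ (rebaseAltPass1 xs).2.length = xs.length
    ∧ (∀ v : Int, (rebaseAltPass1 xs).1.contains v = true → v ∈ xs)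
    ∧ (∀ l ∈ (rebaseAltPass1 xs).2, l < ((rebaseAltPass1 xs).1.size : Int))
    ∧ (∀ v : Int, (rebaseAltPass1 xs).1.contains v = true →
         (rebaseAltPass1 xs).1.getD v 0 < ((rebaseAltPass1 xs).1.size : Int)) := by
  induction xs using List.reverseRecOn with
  | nil =>
    exact ⟨rfl, rfl, by intro v h; simp [rebaseAltPass1] at h,
      by intro l h; simp [rebaseAltPass1] at h,
      by intro v h; simp [rebaseAltPass1] at h⟩
  | append_singleton xs x ih =>
    obtain ⟨hA, hlen, hcont, hlab, hval⟩ := ih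
    set nm := (rebaseAltPass1 xs).1 with hnm
    set ncl := (rebaseAltPass1 xs).2 with hncl
    have hp1 : rebaseAltPass1 (xs ++ [x])
        = (if nm.contains x then nm else nm.insert x (nm.size : Int),
           ncl ++ [(if nm.contains x then nm else nm.insert x (nm.size : Int)).getD x 0]) := by
      unfold rebaseAltPass1
      rw [List.foldl_append]
      rfl
    have henum : PySem.List.enumerate (xs ++ [x]) 0
        = PySem.List.enumerate xs 0 ++ [((xs.length : Int), x)] := by
      rw [PySem.List.enumerate_append]
      simp [PySem.List.enumerate]
    have hfold : (PySem.List.enumerate (xs ++ [x]) 0).foldl stepA (PySem.Dict.empty, [], 0, PySem.Dict.empty)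
        = stepA (nm, ncl, (nm.size : Int), rebaseAltPass2 ncl) ((xs.length : Int), x) := by
      rw [henum, List.foldl_append, hA]; rfl
    -- B's second pass on ncl ++ [l]
    have hp2 : ∀ l : Int, rebaseAltPass2 (ncl ++ [l])
        = (rebaseAltPass2 ncl).insert l ((rebaseAltPass2 ncl).getD l [] ++ [(ncl.length : Int)]) := by
      intro l
      unfold rebaseAltPass2
      rw [PySem.List.enumerate_append, List.foldl_append]
      simp [PySem.List.enumerate]
    -- labels in ncl are exactly the keys of pass 2's dict
    have hkeys : (rebaseAltPass2 ncl).keys = PySem.Set.ofList ncl := by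
      unfold rebaseAltPass2
      rw [PySem.Dict.keys_foldl_insert_key (key := fun p : Int × Int => p.2)]
      simp only [PySem.List.map_snd_enumerate, PySem.Dict.keys_empty]
      exact PySem.Set.update_nil_left ncl
    by_cases hc : nm.contains x = true
    · -- seen vertex
      have hgd : (if nm.contains x then nm else nm.insert x (nm.size : Int)) = nm := by simp [hc]
      refine ⟨?_, ?_, ?_, ?_, ?_⟩
      · rw [hfold, hp1, hgd]
        have : stepA (nm, ncl, (nm.size : Int), rebaseAltPass2 ncl) ((xs.length : Int), x)
            = (nm, ncl ++ [nm.getD x 0], (nm.size : Int),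
               (rebaseAltPass2 ncl).modify (nm.getD x 0) [] (· ++ [(xs.length : Int)])) := by
          simp [stepA, hc]
        rw [this, hp2 (nm.getD x 0), ← hlen]
        rfl
      · rw [hp1, hgd]; simp [hlen]
      · intro v hv
        rw [hp1, hgd] at hv
        exact List.mem_append_left _ (hcont v hv)
      · intro l hl
        rw [hp1, hgd] at hl ⊢
        dsimp only at hl ⊢
        rcases List.mem_append.mp hl with h | h
        · exact hlab l h
        · simp at h
          subst h
          -- the stored label of a seen vertex is < size
          exact hval x hc
      · intro v hv
        rw [hp1, hgd] at hv ⊢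
        exact hval v hv
    · -- fresh vertex
      have hc' : nm.contains x = false := by simpa using hc
      have hgd : (if nm.contains x then nm else nm.insert x (nm.size : Int)) = nm.insert x (nm.size : Int) := by
        simp [hc']
      have hsize : (nm.insert x (nm.size : Int)).size = nm.size + 1 := by
        rw [PySem.Dict.size_insert]; simp [hc']
      refine ⟨?_, ?_, ?_, ?_, ?_⟩
      · rw [hfold, hp1, hgd]
        have hstep : stepA (nm, ncl, (nm.size : Int), rebaseAltPass2 ncl) ((xs.length : Int), x)
            = (nm.insert x (nm.size : Int), ncl ++ [(nm.size : Int)], (nm.size : Int) + 1,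
               (rebaseAltPass2 ncl).insert (nm.size : Int) [(xs.length : Int)]) := by
          simp [stepA, hc']
        have hout : (rebaseAltPass2 ncl).getD (nm.size : Int) [] = [] := by
          apply PySem.Dict.getD_of_not_contains
          rw [PySem.Dict.contains_eq_decide_mem_keys, hkeys]
          simp only [decide_eq_false_iff_not, PySem.Set.mem_ofList]
          intro hmem
          exact absurd rfl (ne_of_lt (hlab _ hmem))
        rw [hstep]
        dsimp only
        rw [PySem.Dict.getD_insert_self, hp2 (nm.size : Int), hout, hsize, hlen]
        push_cast
        ring_nf
        simp
      · rw [hp1, hgd]; simp [hlen]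
      · intro v hv
        rw [hp1, hgd] at hv
        simp only at hv
        rw [PySem.Dict.contains_insert] at hv
        rcases Bool.or_eq_true_iff.mp hv with h | h
        · simp at h; subst h; exact List.mem_append_right _ (by simp)
        · exact List.mem_append_left _ (hcont v h)
      · intro l hl
        rw [hp1, hgd] at hl ⊢
        dsimp only at hl ⊢
        rcases List.mem_append.mp hl with h | h
        · calc l < (nm.size : Int) := hlab l h
            _ ≤ ((nm.insert x (nm.size : Int)).size : Int) := by rw [hsize]; push_cast; omega
        · simp [PySem.Dict.getD_insert_self] at h
          subst h
          rw [hsize]; push_cast; omega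
      · intro v hv
        rw [hp1, hgd] at hv ⊢
        dsimp only at hv ⊢
        by_cases hvx : v = x
        · subst hvx
          rw [PySem.Dict.getD_insert_self, hsize]; push_cast; omega
        · rw [PySem.Dict.contains_insert] at hv
          rcases Bool.or_eq_true_iff.mp hv with h | h
          · simp at h; exact absurd h hvx
          · rw [PySem.Dict.getD_insert_of_ne _ _ _ hvx, hsize]
            calc nm.getD v 0 < (nm.size : Int) := hval v h
              _ ≤ ((nm.size + 1 : Nat) : Int) := by push_cast; omega

-- ===== VERDICT (by name: the statement is the Claim_ definition above) =====
theorem rebaseClusters_spec : Claim_equal_rebaseClusters := by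
  intro list _
  unfold Spec_rebaseClusters rebaseClusters_alt
  rw [rebaseClusters_eq_enum, (invariant list).1]
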